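-- pv_equiv track=rewrite | github.com/azramuk/Adaship | placeShips.py | HorSpace
-- ===== SOURCE A (Python) =====
-- def HorSpace(board, shiplen):
--   space = False
--   empty = 0
--   for i in range(1, len(board)):
--     empty = 0
--     for j in range (1, len(board[i])):
--       if (board[i][j] == "0" or board[i][j] == 0):
--         empty += 1
--       else:
--         empty = 0
--       if (empty >= shiplen):
--         return True
--   return False
-- ===== SOURCE B (Python) =====
-- def HorSpace(board, shiplen):
--     # Blocker-position approach: for each interior row, list the positions of
--     # non-empty cells (with sentinels -1 and len), and test whether the gap
--     # between some consecutive pair of blockers leaves room for the ship.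
--     for row in board[1:]:
--         cells = row[1:]
--         blockers = [-1] + [j for j, c in enumerate(cells)
--                            if not (c == "0" or c == 0)] + [len(cells)]
--         if any(b - a - 1 >= shiplen for a, b in zip(blockers, blockers[1:])):
--             return True
--     return False
-- ===== Notes on version B (the rewrite author's own statement) =====
-- stated objective: alternative
-- what changed: A's running-counter-with-reset scan is replaced by computing the positions of the blocking (non-empty) cells per row with sentinels and testing the arithmetic gap between consecutive blocker positions against shiplen.
-- outside the precondition, e.g. on HorSpace([['x'], ['a']], 0): A returns False, B returns True
import Mathlib
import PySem

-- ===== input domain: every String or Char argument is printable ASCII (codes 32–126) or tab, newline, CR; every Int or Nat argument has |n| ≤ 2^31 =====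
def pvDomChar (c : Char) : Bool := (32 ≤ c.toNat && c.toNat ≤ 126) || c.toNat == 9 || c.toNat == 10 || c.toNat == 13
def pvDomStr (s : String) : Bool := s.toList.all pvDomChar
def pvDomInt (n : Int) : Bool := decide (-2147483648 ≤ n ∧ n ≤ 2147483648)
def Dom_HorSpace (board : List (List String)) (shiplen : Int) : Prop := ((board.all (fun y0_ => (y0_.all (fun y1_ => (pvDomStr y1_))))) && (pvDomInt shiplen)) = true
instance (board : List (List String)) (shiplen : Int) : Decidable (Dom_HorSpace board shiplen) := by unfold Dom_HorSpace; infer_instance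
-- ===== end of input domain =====

-- B replaces A's running-counter scan by listing each row's blocker positions (with sentinels)
-- and testing the gaps between consecutive blockers; same cost, a different algorithm.

-- ===== PORT A =====
-- inner loop 'for j in range(1, len(board[i]))' over the row's tail, carrying the counter `empty`;
-- 'board[i][j] == 0' (string vs int) is always False in Python, so only the '== "0"' test is ported
def HorSpaceRowA (cells : List String) (empty : Int) (shiplen : Int) : Bool :=
  match cells with
  | [] => false
  | c :: cs =>
    let e : Int := if c == "0" then empty + 1 else 0
    if shiplen ≤ e then true else HorSpaceRowA cs e shiplen

-- outer loop 'for i in range(1, len(board))', resetting empty to 0 per row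
def HorSpaceRowsA (rows : List (List String)) (shiplen : Int) : Bool :=
  match rows with
  | [] => false
  | r :: rs => if HorSpaceRowA (r.drop 1) 0 shiplen then true else HorSpaceRowsA rs shiplen

def HorSpace (board : List (List String)) (shiplen : Int) : Bool :=
  HorSpaceRowsA (board.drop 1) shiplen

-- ===== PORT B =====
-- per-row body of Source B's loop:
-- blockers = [-1] + [j for j, c in enumerate(cells) if not (c == "0" or c == 0)] + [len(cells)]
-- ('c == 0' is string vs int in Python, always False, so only the '== "0"' test is ported);
-- any(b - a - 1 >= shiplen for a, b in zip(blockers, blockers[1:]))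
def HorSpaceRowB (cells : List String) (shiplen : Int) : Bool :=
  let blockers : List Int :=
    -1 :: ((PySem.List.enumerate cells).filter (fun p => !(p.2 == "0"))).map (fun p => p.1)
      ++ [(cells.length : Int)]
  (blockers.zip blockers.tail).any (fun p => decide (shiplen ≤ p.2 - p.1 - 1))

-- 'for row in board[1:]: ... return True / return False'
def HorSpace_alt (board : List (List String)) (shiplen : Int) : Bool :=
  (board.drop 1).any (fun row => HorSpaceRowB (row.drop 1) shiplen)

-- ===== PRECONDITION & SPEC =====
-- Pre_ excludes non-positive shiplen: a ship of length ≤ 0 is outside the natural domain, and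
-- there A's and B's answers are both defensible readings of 'room for a zero-length ship'.
def Pre_HorSpace (board : List (List String)) (shiplen : Int) : Prop := 1 ≤ shiplen
instance (board : List (List String)) (shiplen : Int) : Decidable (Pre_HorSpace board shiplen) := by unfold Pre_HorSpace; infer_instance

def pvWitness_HorSpace : List (List String) × Int := ([["#", "0"], ["#", "0", "0"]], 2)

def Spec_HorSpace (board : List (List String)) (shiplen : Int) (out : Bool) : Prop := out = HorSpace_alt board shiplen
instance (board : List (List String)) (shiplen : Int) (out : Bool) : Decidable (Spec_HorSpace board shiplen out) := by unfold Spec_HorSpace; infer_instance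

-- ===== CLAIM (what is proved, stated in full; the proofs are below) =====
def Claim_equal_HorSpace : Prop := ∀ (board : List (List String)) (shiplen : Int), Dom_HorSpace board shiplen → Pre_HorSpace board shiplen → Spec_HorSpace board shiplen (HorSpace board shiplen)

-- ===== LEMMAS AND PROOFS =====

-- the indices (as Ints, offset by s) of blocking cells, i.e. B's list comprehension
def idxFrom (s : Int) : List String → List Int
  | [] => []
  | c :: cs => if c == "0" then idxFrom (s + 1) cs else s :: idxFrom (s + 1) cs

-- the pair scan 'any over zip(l, l[1:])' with the previous element carried
def gapsAny (p : Int) (l : List Int) (shiplen : Int) : Bool :=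
  match l with
  | [] => false
  | x :: xs => decide (shiplen ≤ x - p - 1) || gapsAny x xs shiplen

theorem idxFrom_cons_zero (s : Int) (c : String) (cs : List String) (h : (c == "0") = true) :
    idxFrom s (c :: cs) = idxFrom (s + 1) cs := by simp [idxFrom, h]

theorem idxFrom_cons_block (s : Int) (c : String) (cs : List String) (h : (c == "0") = false) :
    idxFrom s (c :: cs) = s :: idxFrom (s + 1) cs := by simp [idxFrom, h]

theorem rowA_cons (c : String) (cs : List String) (e shiplen : Int) :
    HorSpaceRowA (c :: cs) e shiplen =
      (let e' : Int := if c == "0" then e + 1 else 0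
       if shiplen ≤ e' then true else HorSpaceRowA cs e' shiplen) := rfl

theorem idxFrom_eq_enumerate (cells : List String) : ∀ (s : Int),
    idxFrom s cells =
      ((PySem.List.enumerate cells s).filter (fun p => !(p.2 == "0"))).map (fun p => p.1) := by
  induction cells with
  | nil => intro s; simp [idxFrom, PySem.List.enumerate_nil]
  | cons c cs ih =>
    intro s
    by_cases hc : (c == "0") = true
    · rw [idxFrom_cons_zero s c cs hc]
      simp [PySem.List.enumerate_cons, hc, ih (s + 1)]
    · rw [idxFrom_cons_block s c cs (by simpa using hc)]
      simp [PySem.List.enumerate_cons, hc, ih (s + 1)]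

theorem zip_tail_eq_gapsAny (shiplen : Int) :
    ∀ (l : List Int) (p : Int),
      ((p :: l).zip l).any (fun q => decide (shiplen ≤ q.2 - q.1 - 1)) = gapsAny p l shiplen := by
  intro l
  induction l with
  | nil => intro p; simp [gapsAny]
  | cons x xs ih =>
    intro p
    simp only [List.zip_cons_cons, List.any_cons, gapsAny, ih x]

theorem idxFrom_ge (cells : List String) : ∀ (s : Int), ∀ x ∈ idxFrom s cells, s ≤ x := by
  induction cells with
  | nil => intro s x hx; simp [idxFrom] at hx
  | cons c cs ih =>
    intro s x hx
    by_cases hc : (c == "0") = true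
    · rw [idxFrom_cons_zero s c cs hc] at hx
      have := ih (s + 1) x hx; omega
    · rw [idxFrom_cons_block s c cs (by simpa using hc), List.mem_cons] at hx
      rcases hx with rfl | hx
      · exact le_refl _
      · have := ih (s + 1) x hx; omega

-- core invariant: the gap scan from previous blocker p at offset o equals A's counter
-- scan carrying empty = o - p - 1, provided that counter has not yet reached shiplen
theorem gaps_eq_rowA (shiplen : Int) (h1 : 1 ≤ shiplen) :
    ∀ (cells : List String) (o p : Int), p + 1 ≤ o → o - p - 1 < shiplen →
      gapsAny p (idxFrom o cells ++ [o + (cells.length : Int)]) shiplen =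
        HorSpaceRowA cells (o - p - 1) shiplen := by
  intro cells
  induction cells with
  | nil =>
    intro o p _ hlt
    simp only [idxFrom, List.nil_append, List.length_nil, gapsAny, Bool.or_false, HorSpaceRowA,
      decide_eq_false_iff_not]
    omega
  | cons c cs ih =>
    intro o p hop hlt
    have hcast : o + ((cs.length + 1 : Nat) : Int) = (o + 1) + (cs.length : Int) := by
      push_cast; ring
    by_cases hc : (c == "0") = true
    · rw [idxFrom_cons_zero o c cs hc, rowA_cons]
      simp only [hc, if_true]
      by_cases hs : shiplen ≤ o - p - 1 + 1
      · rw [if_pos hs]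
        -- the next gap end (first blocker index or the sentinel) is ≥ o + 1,
        -- so the first pair already gives a gap ≥ shiplen
        rcases hl : idxFrom (o + 1) cs ++ [(o + 1) + (cs.length : Int)] with _ | ⟨x, xs⟩
        · exact absurd hl (by simp)
        · have hx : o + 1 ≤ x := by
            have hxmem : x ∈ idxFrom (o + 1) cs ++ [(o + 1) + (cs.length : Int)] := by
              rw [hl]; exact List.mem_cons_self
            rcases List.mem_append.mp hxmem with h | h
            · exact idxFrom_ge cs (o + 1) x h
            · simp only [List.mem_singleton] at h; omega
          simp only [List.length_cons, hcast, hl, gapsAny]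
          have hd : decide (shiplen ≤ x - p - 1) = true := by
            simp only [decide_eq_true_eq]; omega
          rw [hd]; simp
      · rw [if_neg hs, List.length_cons, hcast, ih (o + 1) p (by omega) (by omega)]
        have : o - p - 1 + 1 = (o + 1) - p - 1 := by ring
        rw [this]
    · have hcf : (c == "0") = false := by simpa using hc
      rw [idxFrom_cons_block o c cs hcf, rowA_cons]
      simp only [hcf, Bool.false_eq_true, if_false, List.cons_append, gapsAny, List.length_cons,
        hcast]
      have h0 : decide (shiplen ≤ o - p - 1) = false := by
        simp only [decide_eq_false_iff_not]; omega
      have h0' : ¬ shiplen ≤ (0 : Int) := by omega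
      rw [h0, ih (o + 1) o (by omega) (by omega)]
      have : (o + 1) - o - 1 = (0 : Int) := by ring
      rw [this]
      simp [h0']

theorem rowB_eq_rowA (shiplen : Int) (h1 : 1 ≤ shiplen) (cells : List String) :
    HorSpaceRowB cells shiplen = HorSpaceRowA cells 0 shiplen := by
  have hrfl : HorSpaceRowB cells shiplen =
      (((((-1 : Int) ::
            (((PySem.List.enumerate cells).filter (fun p => !(p.2 == "0"))).map (fun p => p.1)
              ++ [(cells.length : Int)]))).zip
          ((((PySem.List.enumerate cells).filter (fun p => !(p.2 == "0"))).map (fun p => p.1)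
              ++ [(cells.length : Int)]))).any
        (fun p => decide (shiplen ≤ p.2 - p.1 - 1))) := rfl
  rw [hrfl, zip_tail_eq_gapsAny shiplen _ (-1), ← idxFrom_eq_enumerate cells 0]
  have := gaps_eq_rowA shiplen h1 cells 0 (-1) (by omega) (by omega)
  simpa using this

theorem rowsA_eq_any (shiplen : Int) (h1 : 1 ≤ shiplen) :
    ∀ (rows : List (List String)),
      HorSpaceRowsA rows shiplen = rows.any (fun row => HorSpaceRowB (row.drop 1) shiplen) := by
  intro rows
  induction rows with
  | nil => simp [HorSpaceRowsA]
  | cons r rs ih =>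
    simp only [HorSpaceRowsA, List.any_cons, ih, rowB_eq_rowA shiplen h1]
    cases HorSpaceRowA (r.drop 1) 0 shiplen <;> simp

-- ===== VERDICT (by name: the statement is the Claim_ definition above) =====
theorem HorSpace_spec : Claim_equal_HorSpace := by
  intro board shiplen _hdom hpre
  unfold Spec_HorSpace HorSpace HorSpace_alt
  exact rowsA_eq_any shiplen hpre (board.drop 1)
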